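-- pv_equiv track=rewrite | github.com/annanda/tesi_trabalhos | ne_extractor.py | remove_unfinished_complements
-- ===== SOURCE A (Python) =====
-- def is_complement(word):
--     text = word[0]
--     return text in ("of", "the", "'s", "'")
--
-- def remove_unfinished_complements(ne):
--     ne_without_trailing_complements = list(ne)
--     for i in range(len(ne) - 1, 0, -1):
--         if is_complement(ne[i]):
--             ne_without_trailing_complements = ne_without_trailing_complements[:-1]
--         else:
--             break
--     return ne_without_trailing_complements
-- ===== SOURCE B (Python) =====
-- def remove_unfinished_complements(ne):
--     k = len(ne)
--     while k > 1 and ne[k - 1][0] in ("of", "the", "'s", "'"):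
--         k -= 1
--     return ne[:k]
-- ===== Notes on version B (the rewrite author's own statement) =====
-- stated objective: simpler
-- what changed: B finds the cutoff index with a single backward scan and slices once, instead of copying the list and repeatedly re-slicing it with [:-1] inside the loop.
import Mathlib
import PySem

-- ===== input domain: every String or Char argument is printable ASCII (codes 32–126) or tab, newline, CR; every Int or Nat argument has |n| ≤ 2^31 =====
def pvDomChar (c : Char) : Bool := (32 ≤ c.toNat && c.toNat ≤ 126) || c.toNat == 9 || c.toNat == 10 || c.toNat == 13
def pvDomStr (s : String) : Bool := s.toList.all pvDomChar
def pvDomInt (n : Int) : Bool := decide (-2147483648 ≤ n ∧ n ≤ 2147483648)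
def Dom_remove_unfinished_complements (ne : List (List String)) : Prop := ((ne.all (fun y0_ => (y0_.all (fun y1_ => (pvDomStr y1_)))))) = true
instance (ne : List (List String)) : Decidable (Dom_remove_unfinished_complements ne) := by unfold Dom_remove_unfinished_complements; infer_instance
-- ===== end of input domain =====

-- B replaces A's repeated [:-1] slicing with a single backward scan for the cutoff index and one slice.

-- ===== PORT A =====
-- is_complement(word): text = word[0]; word[0] raises IndexError on an empty word — excluded by Pre_;
-- the .getD "" default is never reached under Pre_.
def pv_is_complement (word : List String) : Bool :=
  let text := (PySem.List.pyGet? word 0).getD ""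
  text == "of" || text == "the" || text == "'s" || text == "'"

-- the for-loop over range(len(ne)-1, 0, -1) with break
def pvLoopA (ne : List (List String)) (acc : List (List String)) : List Int → List (List String)
  | [] => acc
  | i :: rest =>
    if pv_is_complement ((PySem.List.pyGet? ne i).getD []) then
      pvLoopA ne (PySem.List.slice acc none (some (-1))) rest   -- acc[:-1]
    else acc

def remove_unfinished_complements (ne : List (List String)) : List (List String) :=
  pvLoopA ne ne (PySem.List.pyRange ((ne.length : Int) - 1) 0 (-1))

-- ===== PORT B =====
-- the while loop: while k > 1 and ne[k-1][0] in ("of","the","'s","'"): k -= 1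
def pvLoopB (ne : List (List String)) (k : Nat) : Nat :=
  if h : 1 < k ∧
      (((PySem.List.pyGet? ((PySem.List.pyGet? ne ((k : Int) - 1)).getD []) 0).getD "")
        ∈ (["of", "the", "'s", "'"] : List String)) then
    pvLoopB ne (k - 1)
  else k
termination_by k
decreasing_by omega

def remove_unfinished_complements_alt (ne : List (List String)) : List (List String) :=
  PySem.List.slice ne none (some ((pvLoopB ne ne.length : Nat) : Int))   -- ne[:k]

-- ===== PRECONDITION & SPEC =====
-- Pre_ excludes exactly the inputs on which A raises IndexError: an empty inner list after the
-- head that the backward scan reaches, i.e. one not shielded by a later nonempty non-complement word.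
def Pre_remove_unfinished_complements (ne : List (List String)) : Prop :=
  ∀ i ∈ List.range ne.length, 1 ≤ i → ne.getD i [] = [] →
    ∃ j ∈ List.range ne.length, i < j ∧ ne.getD j [] ≠ [] ∧
      (ne.getD j []).headD "" ∉ (["of", "the", "'s", "'"] : List String)
instance (ne : List (List String)) : Decidable (Pre_remove_unfinished_complements ne) := by
  unfold Pre_remove_unfinished_complements; infer_instance

def pvWitness_remove_unfinished_complements : List (List String) :=
  [["Bank"], ["of"], ["the"]]

def Spec_remove_unfinished_complements (ne : List (List String)) (out : List (List String)) : Prop := out = remove_unfinished_complements_alt ne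
instance (ne : List (List String)) (out : List (List String)) : Decidable (Spec_remove_unfinished_complements ne out) := by unfold Spec_remove_unfinished_complements; infer_instance

-- ===== CLAIM (what is proved, stated in full; the proofs are below) =====
def Claim_equal_remove_unfinished_complements : Prop := ∀ (ne : List (List String)), Dom_remove_unfinished_complements ne → Pre_remove_unfinished_complements ne → Spec_remove_unfinished_complements ne (remove_unfinished_complements ne)

-- ===== LEMMAS AND PROOFS =====

-- A's complement test and B's membership test compute the same Boolean.
theorem check_eq (w : List String) :
    (((PySem.List.pyGet? w 0).getD "") ∈ (["of", "the", "'s", "'"] : List String))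
      = pv_is_complement w := by
  simp [pv_is_complement, List.mem_cons]
  tauto

-- Main loop correspondence: starting from the prefix ne.take k, A's countdown loop over
-- range(k-1, 0, -1) ends at the prefix of length pvLoopB ne k.
theorem loop_eq (ne : List (List String)) (k : Nat) (hk : 1 <= k) (hle : k <= ne.length) :
    pvLoopA ne (ne.take k) (PySem.List.pyRange ((k : Int) - 1) 0 (-1))
      = ne.take (pvLoopB ne k) := by
  induction k with
  | zero => omega
  | succ k ih =>
    by_cases h1 : 1 <= k
    · have hklt : k < ne.length := by omega
      have hkk : ((k + 1 : Nat) : Int) - 1 = ((k : Nat) : Int) := by push_cast; ring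
      rw [hkk, PySem.List.pyRange_neg_one_cons (by exact_mod_cast h1)]
      have hget : (PySem.List.pyGet? ne ((k : Nat) : Int)).getD [] = ne[k] := by
        simp [PySem.List.pyGet?, PySem.List.pyIdx?, hklt]
      have hB : pvLoopB ne (k + 1) =
          (if pv_is_complement ne[k] then pvLoopB ne k else k + 1) := by
        rw [pvLoopB, hkk, hget]
        by_cases hc : pv_is_complement ne[k]
        · rw [if_pos hc, dif_pos ⟨by omega, by rw [check_eq]; exact hc⟩]
          norm_num
        · rw [if_neg hc, dif_neg]
          intro hcon
          exact hc (by rw [← check_eq]; exact hcon.2)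
      by_cases hc : pv_is_complement ne[k]
      · have hdrop : PySem.List.slice (ne.take (k + 1)) none (some (-1)) = ne.take k := by
          rw [PySem.List.slice_to_neg_one, List.dropLast_eq_take, List.take_take]
          congr 1
          simp [List.length_take]
          omega
        rw [pvLoopA]
        simp only [hget, hc, if_pos, hdrop]
        rw [ih h1 (by omega), hB, if_pos hc]
      · rw [pvLoopA]
        simp only [hget, hc, Bool.false_eq_true, if_false]
        rw [hB, if_neg hc]
    · have hk0 : k = 0 := by omega
      subst hk0
      rw [pvLoopB]
      have h0 : ((1 : Nat) : Int) - 1 = 0 := by norm_num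
      rw [h0, PySem.List.pyRange_neg_one_eq_nil (by norm_num)]
      rw [pvLoopA]
      simp
-- ===== VERDICT (by name: the statement is the Claim_ definition above) =====
theorem remove_unfinished_complements_spec : Claim_equal_remove_unfinished_complements := by
  intro ne _ _
  unfold Spec_remove_unfinished_complements remove_unfinished_complements remove_unfinished_complements_alt
  rw [PySem.List.slice_to_natCast]
  by_cases h : 1 <= ne.length
  · have := loop_eq ne ne.length h (le_refl _)
    rw [List.take_length] at this
    exact this
  · have h0 : ne = [] := by
      cases ne with
      | nil => rfl
      | cons a l => simp at h
    subst h0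
    rw [pvLoopB]
    rfl
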